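-- pv_equiv track=rewrite | github.com/abrahamshimekt/Competitive-Programming-Problem-Solutions | x_sum/d_x_sum.py | main_diagonal_sum
-- ===== SOURCE A (Python) =====
-- def main_diagonal_sum(grid,m,n):
--     main_diagonal = {}
--
--     for col in range(n):
--         c = col
--         r = 0
--         curr_sum = 0
--         row_col = []
--         while r < m and c < n:
--             curr_sum += int(grid[r][c])
--             row_col.append((r,c))
--             r +=1
--             c +=1
--         for pair in row_col:
--             main_diagonal[pair] = curr_sum
--
--     for row in range(1,m):
--         r = row
--         c = 0
--         curr_sum = 0
--         row_col = []
--         while r < m and c < n: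
--             curr_sum += int(grid[r][c])
--             row_col.append((r,c))
--             r +=1
--             c +=1
--         for pair in row_col:
--             main_diagonal[pair] = curr_sum
--
--     return main_diagonal
-- ===== SOURCE B (Python) =====
-- def main_diagonal_sum(grid, m, n):
--     diag = {}
--     for r in range(m):
--         for c in range(n):
--             diag[r - c] = diag.get(r - c, 0) + int(grid[r][c])
--     starts = [(0, c) for c in range(n)] + [(r, 0) for r in range(1, m)]
--     result = {}
--     for r, c in starts:
--         while r < m and c < n:
--             result[(r, c)] = diag[r - c]
--             r += 1
--             c += 1
--     return result
-- ===== Notes on version B (the rewrite author's own statement) =====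
-- stated objective: alternative
-- what changed: A computes each diagonal's sum by walking the diagonal with a running accumulator and a collected cell list, in two separate loop nests (top-row starts, then left-column starts); B computes all diagonal sums in a single row-major pass into a table keyed by the difference r-c, then walks each diagonal from its start cell merely assigning the precomputed sum.
import Mathlib
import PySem

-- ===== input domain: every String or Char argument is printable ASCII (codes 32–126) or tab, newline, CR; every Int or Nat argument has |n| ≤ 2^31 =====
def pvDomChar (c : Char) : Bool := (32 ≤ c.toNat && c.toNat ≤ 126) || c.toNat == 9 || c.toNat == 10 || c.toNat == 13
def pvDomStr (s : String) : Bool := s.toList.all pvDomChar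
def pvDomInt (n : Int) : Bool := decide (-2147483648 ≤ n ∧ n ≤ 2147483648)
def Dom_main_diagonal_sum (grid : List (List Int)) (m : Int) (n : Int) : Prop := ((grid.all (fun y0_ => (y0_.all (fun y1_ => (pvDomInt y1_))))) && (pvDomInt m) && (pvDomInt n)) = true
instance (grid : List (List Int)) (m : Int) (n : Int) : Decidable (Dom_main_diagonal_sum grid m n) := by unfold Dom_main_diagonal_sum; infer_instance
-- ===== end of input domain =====

-- B replaces A's per-diagonal accumulating walks by one row-major pass into a table keyed by the
-- difference r-c, then an assignment-only walk along each diagonal; same O(m*n) cost (objective: alternative).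

-- ===== PORT A =====
-- int(grid[r][c]) : pyGet? is none exactly where Python raises IndexError; those inputs are excluded by Pre_.
def pvGet2 (grid : List (List Int)) (r c : Int) : Int :=
  (PySem.List.pyGet? ((PySem.List.pyGet? grid r).getD []) c).getD 0

-- the 'while r < m and c < n' walk of A, carrying curr_sum and row_col
-- (fuel (m - r).toNat is a totality device only: it bounds the number of iterations, r < m fails once it runs out)
def pvWalkAux (grid : List (List Int)) (m n : Int) :
    Nat → Int → Int → Int → List (Int × Int) → Int × List (Int × Int)
  | 0, _, _, s, rc => (s, rc)
  | fuel + 1, r, c, s, rc =>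
    if r < m ∧ c < n then
      pvWalkAux grid m n fuel (r + 1) (c + 1) (s + pvGet2 grid r c) (rc ++ [(r, c)])
    else (s, rc)

def pvWalk (grid : List (List Int)) (m n r c s : Int) (rc : List (Int × Int)) :
    Int × List (Int × Int) :=
  pvWalkAux grid m n (m - r).toNat r c s rc

def main_diagonal_sum (grid : List (List Int)) (m : Int) (n : Int) : List (Int × Int × Int) :=
  let d1 : PySem.Dict (Int × Int) Int :=
    (PySem.List.pyRange 0 n 1).foldl (fun md col =>
      let w := pvWalk grid m n 0 col 0 []
      w.2.foldl (fun md p => md.insert p w.1) md) PySem.Dict.empty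
  let d2 : PySem.Dict (Int × Int) Int :=
    (PySem.List.pyRange 1 m 1).foldl (fun md row =>
      let w := pvWalk grid m n row 0 0 []
      w.2.foldl (fun md p => md.insert p w.1) md) d1
  d2.items.map (fun p => (p.1.1, p.1.2, p.2))

-- ===== PORT B =====
-- Source B's 'while r < m and c < n: result[(r,c)] = diag[r-c]' walk; diag[r-c] never misses inside the
-- walk (the key was filled for every rectangle cell), so the lookup is ported as getD.
-- (fuel (m - r).toNat is a totality device only, as in pvWalkAux)
def pvEmitAux (m n : Int) (diag : PySem.Dict Int Int) :
    Nat → Int → Int → PySem.Dict (Int × Int) Int → PySem.Dict (Int × Int) Int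
  | 0, _, _, res => res
  | fuel + 1, r, c, res =>
    if r < m ∧ c < n then
      pvEmitAux m n diag fuel (r + 1) (c + 1) (res.insert (r, c) (diag.getD (r - c) 0))
    else res

def pvEmit (m n : Int) (diag : PySem.Dict Int Int) (r c : Int)
    (res : PySem.Dict (Int × Int) Int) : PySem.Dict (Int × Int) Int :=
  pvEmitAux m n diag (m - r).toNat r c res

def main_diagonal_sum_alt (grid : List (List Int)) (m : Int) (n : Int) : List (Int × Int × Int) :=
  let diag : PySem.Dict Int Int :=
    (PySem.List.pyRange 0 m 1).foldl (fun dg r =>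
      (PySem.List.pyRange 0 n 1).foldl (fun dg c =>
        dg.insert (r - c) (dg.getD (r - c) 0 + pvGet2 grid r c)) dg) PySem.Dict.empty
  let starts : List (Int × Int) :=
    (PySem.List.pyRange 0 n 1).map (fun c => ((0 : Int), c))
      ++ (PySem.List.pyRange 1 m 1).map (fun r => (r, (0 : Int)))
  let res : PySem.Dict (Int × Int) Int :=
    starts.foldl (fun res rc => pvEmit m n diag rc.1 rc.2 res) PySem.Dict.empty
  res.items.map (fun p => (p.1.1, p.1.2, p.2))

-- ===== PRECONDITION & SPEC =====
-- Pre_ excludes exactly the inputs where Python A raises IndexError: when both loop bounds are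
-- positive, A reads every cell (r,c) with r<m, c<n, so the first m rows must exist and have length ≥ n.
def Pre_main_diagonal_sum (grid : List (List Int)) (m : Int) (n : Int) : Prop :=
  0 < m → 0 < n → (m ≤ (grid.length : Int) ∧ ∀ row ∈ grid.take m.toNat, n ≤ (row.length : Int))
instance (grid : List (List Int)) (m : Int) (n : Int) : Decidable (Pre_main_diagonal_sum grid m n) := by
  unfold Pre_main_diagonal_sum; infer_instance

def pvWitness_main_diagonal_sum : List (List Int) × Int × Int := ([[1, 2], [3, 4]], 2, 2)

def Spec_main_diagonal_sum (grid : List (List Int)) (m : Int) (n : Int) (out : List (Int × Int × Int)) : Prop := out = main_diagonal_sum_alt grid m n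
instance (grid : List (List Int)) (m : Int) (n : Int) (out : List (Int × Int × Int)) : Decidable (Spec_main_diagonal_sum grid m n out) := by unfold Spec_main_diagonal_sum; infer_instance

-- ===== CLAIM (what is proved, stated in full; the proofs are below) =====
def Claim_equal_main_diagonal_sum : Prop := ∀ (grid : List (List Int)) (m : Int) (n : Int), Dom_main_diagonal_sum grid m n → Pre_main_diagonal_sum grid m n → Spec_main_diagonal_sum grid m n (main_diagonal_sum grid m n)

-- ===== LEMMAS AND PROOFS =====

-- the cells of the diagonal starting at (r, c), in walk order
def pvCells (m n r c : Int) : List (Int × Int) :=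
  (PySem.List.pyRange 0 (min (m - r) (n - c)) 1).map (fun k => (r + k, c + k))

-- the cells of the diagonal with difference d = r - c
def pvCellsD (m n d : Int) : List (Int × Int) := pvCells m n (max d 0) (max (-d) 0)

def pvVal (grid : List (List Int)) (p : Int × Int) : Int := pvGet2 grid p.1 p.2

-- the diagonal sum for difference d
def pvS (grid : List (List Int)) (m n d : Int) : Int := ((pvCellsD m n d).map (pvVal grid)).sum

-- the diagonals in A's (and B's) emission order
def pvDs (m n : Int) : List Int :=
  (PySem.List.pyRange 0 n 1).map (fun col => -col) ++ PySem.List.pyRange 1 m 1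

lemma pvCells_cons (m n r c : Int) (h : r < m ∧ c < n) :
    pvCells m n r c = (r, c) :: pvCells m n (r + 1) (c + 1) := by
  apply List.ext_getElem
  · simp only [pvCells, List.length_map, PySem.List.length_pyRange_one, List.length_cons]
    omega
  · intro i h1 h2
    match i with
    | 0 => simp [pvCells, PySem.List.getElem_pyRange_one]
    | i + 1 =>
      simp only [pvCells, List.getElem_map, PySem.List.getElem_pyRange_one,
        List.getElem_cons_succ, Prod.mk.injEq]
      constructor <;> push_cast <;> ring

lemma pvWalkAux_eq (grid : List (List Int)) (m n : Int) :
    ∀ (fuel : Nat) (r c s : Int) (rc : List (Int × Int)), (m - r).toNat ≤ fuel →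
      pvWalkAux grid m n fuel r c s rc
        = (s + ((pvCells m n r c).map (pvVal grid)).sum, rc ++ pvCells m n r c) := by
  intro fuel
  induction fuel with
  | zero =>
    intro r c s rc hf
    have ht : PySem.List.pyRange 0 (min (m - r) (n - c)) 1 = [] :=
      PySem.List.pyRange_one_eq_nil (by omega)
    simp [pvWalkAux, pvCells, ht]
  | succ fuel ih =>
    intro r c s rc hf
    by_cases h : r < m ∧ c < n
    · rw [pvWalkAux, if_pos h, ih _ _ _ _ (by omega), pvCells_cons m n r c h]
      simp [pvVal]
      ring
    · have ht : PySem.List.pyRange 0 (min (m - r) (n - c)) 1 = [] :=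
        PySem.List.pyRange_one_eq_nil (by omega)
      rw [pvWalkAux, if_neg h]
      simp [pvCells, ht]

lemma pvWalk_eq (grid : List (List Int)) (m n : Int) :
    ∀ r c s rc, pvWalk grid m n r c s rc
      = (s + ((pvCells m n r c).map (pvVal grid)).sum, rc ++ pvCells m n r c) := by
  intro r c s rc
  exact pvWalkAux_eq grid m n _ r c s rc le_rfl

lemma pvEmitAux_eq (m n : Int) (diag : PySem.Dict Int Int) :
    ∀ (fuel : Nat) (r c : Int) (res : PySem.Dict (Int × Int) Int), (m - r).toNat ≤ fuel →
      pvEmitAux m n diag fuel r c res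
        = (pvCells m n r c).foldl (fun res p => res.insert p (diag.getD (r - c) 0)) res := by
  intro fuel
  induction fuel with
  | zero =>
    intro r c res hf
    have ht : PySem.List.pyRange 0 (min (m - r) (n - c)) 1 = [] :=
      PySem.List.pyRange_one_eq_nil (by omega)
    simp [pvEmitAux, pvCells, ht]
  | succ fuel ih =>
    intro r c res hf
    by_cases h : r < m ∧ c < n
    · rw [pvEmitAux, if_pos h, ih _ _ _ (by omega), pvCells_cons m n r c h]
      simp only [List.foldl_cons]
      rw [show r + 1 - (c + 1) = r - c from by ring]
    · have ht : PySem.List.pyRange 0 (min (m - r) (n - c)) 1 = [] :=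
        PySem.List.pyRange_one_eq_nil (by omega)
      rw [pvEmitAux, if_neg h]
      simp [pvCells, ht]

lemma pvEmit_eq (m n : Int) (diag : PySem.Dict Int Int) :
    ∀ r c res, pvEmit m n diag r c res
      = (pvCells m n r c).foldl (fun res p => res.insert p (diag.getD (r - c) 0)) res := by
  intro r c res
  exact pvEmitAux_eq m n diag _ r c res le_rfl

lemma pvCellsD_diff {m n d : Int} {p : Int × Int} (hp : p ∈ pvCellsD m n d) : p.1 - p.2 = d := by
  simp only [pvCellsD, pvCells, List.mem_map] at hp
  obtain ⟨k, _, rfl⟩ := hp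
  simp only []
  omega

lemma pvCellsD_nodup (m n d : Int) : (pvCellsD m n d).Nodup := by
  unfold pvCellsD pvCells
  apply List.Nodup.map _ (PySem.List.nodup_pyRange_one _ _)
  intro k1 k2 h
  simp only [Prod.mk.injEq] at h
  omega

lemma pvDs_nodup (m n : Int) : (pvDs m n).Nodup := by
  apply List.Nodup.append
  · exact (PySem.List.nodup_pyRange_one 0 n).map (fun a b h => by omega)
  · exact PySem.List.nodup_pyRange_one 1 m
  · intro x hx1 hx2
    simp only [List.mem_map, PySem.List.mem_pyRange_one] at hx1 hx2
    obtain ⟨c, hc, rfl⟩ := hx1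
    omega

-- the dict-building loop shared by both ports: per diagonal, insert every cell with one value
lemma pvBuild (m n : Int) (f : Int → Int) :
    ∀ (D : List Int) (md : PySem.Dict (Int × Int) Int), D.Nodup → md.keys.Nodup →
      (∀ p ∈ md.keys, p.1 - p.2 ∉ D) →
      (D.foldl (fun md d => (pvCellsD m n d).foldl (fun md p => md.insert p (f d)) md) md).items
        = md.items ++ D.flatMap (fun d => (pvCellsD m n d).map (fun p => (p, f d))) := by
  intro D
  induction D with
  | nil => intro md _ _ _; simp
  | cons d D ih =>
    intro md hD hk hfresh
    have hfresh' : ∀ p ∈ pvCellsD m n d, md.contains p = false := by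
      intro p hp
      have : p ∉ md.keys := fun hmem => hfresh p hmem (by rw [pvCellsD_diff hp]; simp)
      have := (PySem.Dict.contains_iff_mem_keys (d := md) (k := p)).not.mpr this
      simpa using this
    have hitems := PySem.Dict.items_foldl_insert_fresh (pvCellsD m n d) id (fun _ => f d) md
      hfresh' (by simpa using pvCellsD_nodup m n d)
    have hkeys : ((pvCellsD m n d).foldl (fun md p => md.insert p (f d)) md).keys
        = md.keys ++ pvCellsD m n d := by
      simp only [PySem.Dict.keys]
      rw [show (fun (md : PySem.Dict (Int × Int) Int) (p : Int × Int) => md.insert p (f d))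
            = (fun md p => md.insert (id p) ((fun _ => f d) p)) from rfl, hitems]
      simp [Function.comp_def]
    simp only [List.foldl_cons, List.flatMap_cons]
    rw [show (fun (md : PySem.Dict (Int × Int) Int) (p : Int × Int) => md.insert p (f d))
          = (fun md p => md.insert (id p) ((fun _ => f d) p)) from rfl] at *
    rw [ih _ ?_ ?_ ?_, hitems]
    · simp
    · exact hD.of_cons
    · rw [hkeys]
      refine List.Nodup.append hk (pvCellsD_nodup m n d) ?_
      intro p hp1 hp2
      exact hfresh p hp1 (by rw [pvCellsD_diff hp2]; simp)
    · rw [hkeys]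
      intro p hp
      rcases List.mem_append.mp hp with h1 | h2
      · intro hmem; exact hfresh p h1 (List.mem_cons_of_mem _ hmem)
      · rw [pvCellsD_diff h2]
        exact (List.nodup_cons.mp hD).1

-- getD after a fold of 'dg[key] = dg.get(key, 0) + value' is the matching-key sum
lemma pvGetD_bump_fold {α : Type} (key f : α → Int) :
    ∀ (l : List α) (dg : PySem.Dict Int Int) (x : Int),
      (l.foldl (fun dg a => dg.insert (key a) (dg.getD (key a) 0 + f a)) dg).getD x 0
        = dg.getD x 0 + ((l.filter (fun a => key a = x)).map f).sum := by
  intro l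
  induction l with
  | nil => simp
  | cons a l ih =>
    intro dg x
    simp only [List.foldl_cons, ih, List.filter_cons]
    by_cases h : key a = x
    · simp [h]
      ring
    · simp [h, PySem.Dict.getD_insert, Ne.symm h]

-- the m×n rectangle in row-major order
def pvRect (m n : Int) : List (Int × Int) :=
  (PySem.List.pyRange 0 m 1).flatMap (fun r => (PySem.List.pyRange 0 n 1).map (fun c => (r, c)))

lemma pvRect_filter (m n d : Int) :
    (pvRect m n).filter (fun p => p.1 - p.2 = d) = pvCellsD m n d := by
  have hrow : ∀ r : Int,
      ((PySem.List.pyRange 0 n 1).map (fun c => (r, c))).filter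
          (fun p : Int × Int => decide (p.1 - p.2 = d))
        = if 0 ≤ r - d ∧ r - d < n then [(r, r - d)] else [] := by
    intro r
    rw [List.filter_map]
    have hpred : ((fun p : Int × Int => decide (p.1 - p.2 = d)) ∘ (fun c => (r, c)))
        = fun c => decide (c = r - d) := by
      funext c
      simp only [Function.comp_apply, decide_eq_decide]
      omega
    rw [hpred, List.filter_eq]
    by_cases hmem : (0 ≤ r - d ∧ r - d < n)
    · rw [if_pos hmem,
        List.count_eq_one_of_mem (PySem.List.nodup_pyRange_one 0 n)
          ((PySem.List.mem_pyRange_one).mpr ⟨hmem.1, hmem.2⟩)]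
      simp
    · rw [if_neg hmem, List.count_eq_zero_of_not_mem]
      · simp
      · intro hc
        exact hmem ((PySem.List.mem_pyRange_one).mp hc)
  have h1 : (pvRect m n).filter (fun p => p.1 - p.2 = d)
      = (PySem.List.pyRange 0 m 1).flatMap
          (fun r => if 0 ≤ r - d ∧ r - d < n then [(r, r - d)] else []) := by
    unfold pvRect
    rw [List.filter_flatMap]
    congr 1
    funext r
    exact hrow r
  rw [h1]
  by_cases hab : max d 0 < min m (n + d)
  · have hsplit : PySem.List.pyRange 0 m 1
        = PySem.List.pyRange 0 (max d 0) 1 ++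
          (PySem.List.pyRange (max d 0) (min m (n + d)) 1 ++
           PySem.List.pyRange (min m (n + d)) m 1) := by
      rw [← PySem.List.pyRange_one_append (max d 0) (min m (n + d)) m (by omega) (by omega),
        ← PySem.List.pyRange_one_append 0 (max d 0) m (by omega) (by omega)]
    rw [hsplit, List.flatMap_append, List.flatMap_append]
    have hseg1 : (PySem.List.pyRange 0 (max d 0) 1).flatMap
        (fun r => if 0 ≤ r - d ∧ r - d < n then [(r, r - d)] else []) = [] := by
      rw [List.flatMap_eq_nil_iff]
      intro r hr
      rw [PySem.List.mem_pyRange_one] at hr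
      rw [if_neg (by omega)]
    have hseg3 : (PySem.List.pyRange (min m (n + d)) m 1).flatMap
        (fun r => if 0 ≤ r - d ∧ r - d < n then [(r, r - d)] else []) = [] := by
      rw [List.flatMap_eq_nil_iff]
      intro r hr
      rw [PySem.List.mem_pyRange_one] at hr
      rw [if_neg (by omega)]
    have hmid : (PySem.List.pyRange (max d 0) (min m (n + d)) 1).flatMap
        (fun r => if 0 ≤ r - d ∧ r - d < n then [(r, r - d)] else [])
        = (PySem.List.pyRange (max d 0) (min m (n + d)) 1).map (fun r => (r, r - d)) := by
      rw [List.flatMap_congr (g := fun r => [(r, r - d)])]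
      · exact List.map_eq_flatMap.symm
      · intro r hr
        rw [PySem.List.mem_pyRange_one] at hr
        rw [if_pos (by omega)]
    rw [hseg1, hseg3, hmid]
    apply List.ext_getElem
    · simp only [List.nil_append, List.append_nil, List.length_map,
        PySem.List.length_pyRange_one, pvCellsD, pvCells]
      omega
    · intro i h1' h2'
      simp only [List.nil_append, List.append_nil, List.getElem_map,
        PySem.List.getElem_pyRange_one, pvCellsD, pvCells, Prod.mk.injEq]
      omega
  · have hcell : pvCellsD m n d = [] := by
      unfold pvCellsD pvCells
      rw [PySem.List.pyRange_one_eq_nil (by omega)]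
      rfl
    rw [hcell, List.flatMap_eq_nil_iff]
    intro r hr
    rw [PySem.List.mem_pyRange_one] at hr
    rw [if_neg (by omega)]

lemma pvDiag_getD (grid : List (List Int)) (m n d : Int) :
    ((PySem.List.pyRange 0 m 1).foldl (fun dg r =>
        (PySem.List.pyRange 0 n 1).foldl
          (fun dg c => dg.insert (r - c) (dg.getD (r - c) 0 + pvGet2 grid r c)) dg)
      PySem.Dict.empty).getD d 0 = pvS grid m n d := by
  have h1 : (PySem.List.pyRange 0 m 1).foldl (fun dg r =>
        (PySem.List.pyRange 0 n 1).foldl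
          (fun dg c => dg.insert (r - c) (dg.getD (r - c) 0 + pvGet2 grid r c)) dg)
      PySem.Dict.empty
      = (pvRect m n).foldl
          (fun dg p => dg.insert (p.1 - p.2) (dg.getD (p.1 - p.2) 0 + pvVal grid p))
          PySem.Dict.empty := by
    unfold pvRect
    rw [List.foldl_flatMap]
    congr 1
    funext dg r
    rw [List.foldl_map]
    rfl
  rw [h1, pvGetD_bump_fold (fun p : Int × Int => p.1 - p.2) (pvVal grid) (pvRect m n)
    PySem.Dict.empty d]
  have := pvRect_filter m n d
  simp only [PySem.Dict.getD_empty, zero_add]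
  rw [show ((pvRect m n).filter fun p : Int × Int => decide (p.1 - p.2 = d))
        = pvCellsD m n d from this]
  rfl

lemma mainA_items (grid : List (List Int)) (m n : Int) :
    main_diagonal_sum grid m n
      = ((pvDs m n).flatMap (fun d => (pvCellsD m n d).map (fun p => (p, pvS grid m n d)))).map
          (fun p => (p.1.1, p.1.2, p.2)) := by
  unfold main_diagonal_sum
  have hbody1 : ∀ (md : PySem.Dict (Int × Int) Int),
      (PySem.List.pyRange 0 n 1).foldl (fun md col =>
        (pvWalk grid m n 0 col 0 []).2.foldl
          (fun md p => md.insert p (pvWalk grid m n 0 col 0 []).1) md) md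
      = (PySem.List.pyRange 0 n 1).foldl (fun md col =>
          (pvCellsD m n (-col)).foldl
            (fun md p => md.insert p (pvS grid m n (-col))) md) md := by
    intro md
    apply PySem.List.foldl_congr_mem
    intro acc col hcol
    have h0 : 0 ≤ col := ((PySem.List.mem_pyRange_one).mp hcol).1
    have e1 : max (-col) 0 = 0 := by omega
    have e2 : max (- -col) 0 = col := by omega
    have hc : pvCellsD m n (-col) = pvCells m n 0 col := by
      rw [pvCellsD, e1, e2]
    simp only [pvWalk_eq, List.nil_append, zero_add, pvS, hc]
  have hbody2 : ∀ (md : PySem.Dict (Int × Int) Int),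
      (PySem.List.pyRange 1 m 1).foldl (fun md row =>
        (pvWalk grid m n row 0 0 []).2.foldl
          (fun md p => md.insert p (pvWalk grid m n row 0 0 []).1) md) md
      = (PySem.List.pyRange 1 m 1).foldl (fun md row =>
          (pvCellsD m n row).foldl
            (fun md p => md.insert p (pvS grid m n row)) md) md := by
    intro md
    apply PySem.List.foldl_congr_mem
    intro acc row hrow
    have h0 : 1 ≤ row := ((PySem.List.mem_pyRange_one).mp hrow).1
    have e1 : max row 0 = row := by omega
    have e2 : max (-row) 0 = 0 := by omega
    have hc : pvCellsD m n row = pvCells m n row 0 := by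
      rw [pvCellsD, e1, e2]
    simp only [pvWalk_eq, List.nil_append, zero_add, pvS, hc]
  simp only [hbody1, hbody2]
  have hmapneg : (PySem.List.pyRange 0 n 1).foldl (fun md col =>
        (pvCellsD m n (-col)).foldl
          (fun md p => md.insert p (pvS grid m n (-col))) md) PySem.Dict.empty
      = ((PySem.List.pyRange 0 n 1).map (fun col => -col)).foldl (fun md d =>
          (pvCellsD m n d).foldl
            (fun md p => md.insert p (pvS grid m n d)) md) PySem.Dict.empty := by
    rw [List.foldl_map]
  rw [hmapneg, ← List.foldl_append,
    show ((PySem.List.pyRange 0 n 1).map (fun col => -col) ++ PySem.List.pyRange 1 m 1)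
      = pvDs m n from rfl,
    pvBuild m n (pvS grid m n) (pvDs m n) PySem.Dict.empty (pvDs_nodup m n)
      (by rw [PySem.Dict.keys_empty]; exact List.nodup_nil)
      (by intro p hp; rw [PySem.Dict.keys_empty] at hp; cases hp)]
  simp [show (PySem.Dict.empty : PySem.Dict (Int × Int) Int).items = [] from rfl]

lemma mainB_items (grid : List (List Int)) (m n : Int) :
    main_diagonal_sum_alt grid m n
      = ((pvDs m n).flatMap (fun d => (pvCellsD m n d).map (fun p => (p, pvS grid m n d)))).map
          (fun p => (p.1.1, p.1.2, p.2)) := by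
  unfold main_diagonal_sum_alt
  simp only [pvEmit_eq, pvDiag_getD]
  rw [List.foldl_append, List.foldl_map, List.foldl_map]
  have hbody1 : ∀ (md : PySem.Dict (Int × Int) Int),
      (PySem.List.pyRange 0 n 1).foldl (fun res c =>
        (pvCells m n 0 c).foldl (fun res p => res.insert p (pvS grid m n (0 - c))) res) md
      = (PySem.List.pyRange 0 n 1).foldl (fun res c =>
          (pvCellsD m n (-c)).foldl (fun res p => res.insert p (pvS grid m n (-c))) res) md := by
    intro md
    apply PySem.List.foldl_congr_mem
    intro acc c hc
    have h0 : 0 ≤ c := ((PySem.List.mem_pyRange_one).mp hc).1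
    have e1 : max (-c) 0 = 0 := by omega
    have e2 : max (- -c) 0 = c := by omega
    have hcc : pvCellsD m n (-c) = pvCells m n 0 c := by rw [pvCellsD, e1, e2]
    simp only [hcc, zero_sub]
  have hbody2 : ∀ (md : PySem.Dict (Int × Int) Int),
      (PySem.List.pyRange 1 m 1).foldl (fun res r =>
        (pvCells m n r 0).foldl (fun res p => res.insert p (pvS grid m n (r - 0))) res) md
      = (PySem.List.pyRange 1 m 1).foldl (fun res r =>
          (pvCellsD m n r).foldl (fun res p => res.insert p (pvS grid m n r)) res) md := by
    intro md
    apply PySem.List.foldl_congr_mem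
    intro acc r hr
    have h0 : 1 ≤ r := ((PySem.List.mem_pyRange_one).mp hr).1
    have e1 : max r 0 = r := by omega
    have e2 : max (-r) 0 = 0 := by omega
    have hcc : pvCellsD m n r = pvCells m n r 0 := by rw [pvCellsD, e1, e2]
    simp only [hcc, sub_zero]
  rw [hbody1, hbody2]
  have hmapneg :
      (PySem.List.pyRange 0 n 1).foldl (fun res c =>
        (pvCellsD m n (-c)).foldl (fun res p => res.insert p (pvS grid m n (-c))) res)
        PySem.Dict.empty
      = ((PySem.List.pyRange 0 n 1).map (fun col => -col)).foldl (fun res d =>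
          (pvCellsD m n d).foldl (fun res p => res.insert p (pvS grid m n d)) res)
          PySem.Dict.empty := by
    rw [List.foldl_map]
  rw [hmapneg, ← List.foldl_append,
    show ((PySem.List.pyRange 0 n 1).map (fun col => -col) ++ PySem.List.pyRange 1 m 1)
      = pvDs m n from rfl,
    pvBuild m n (pvS grid m n) (pvDs m n) PySem.Dict.empty (pvDs_nodup m n)
      (by rw [PySem.Dict.keys_empty]; exact List.nodup_nil)
      (by intro p hp; rw [PySem.Dict.keys_empty] at hp; cases hp)]
  simp [show (PySem.Dict.empty : PySem.Dict (Int × Int) Int).items = [] from rfl]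

-- ===== VERDICT (by name: the statement is the Claim_ definition above) =====
theorem main_diagonal_sum_spec : Claim_equal_main_diagonal_sum := by
  intro grid m n _ _
  unfold Spec_main_diagonal_sum
  rw [mainA_items, mainB_items]
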